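-- pv_equiv track=rewrite | github.com/AnjanStha/Hit137_SoftwareAssignment2 | Q1.py | text_encryption
-- ===== SOURCE A (Python) =====
-- def text_encryption(msg, first_key, second_key):
--
--     enc_text = ''
--     to_shift = 0
--
--     for ch in msg:
--         # check single character is upper case
--         if ch.isupper():
--             # ch is/between upper case A and M
--             if ord(ch) >= ord('A') and ord(ch) <= ord('M'):
--
--                 to_shift = first_key
--                 # shift backward by first entered key
--                 enc_text = enc_text + chr(((ord(ch) - ord('A') - to_shift) % 26) + ord('A'))
--
--             # ch is/between upper case N and Z
--             elif ord(ch) >= ord('N') and ord(ch) <= ord('Z'):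
--
--                 to_shift = second_key ** 2
--                 # shift forward
--                 enc_text = enc_text + chr(((ord(ch) - ord('A') + to_shift ) % 26) + ord('A'))
--
--         # check single character is lower case
--         elif ch.islower():
--             # ch is/between lower case a and m
--             if ord(ch) >= ord('a') and ord(ch) <= ord('m'):
--
--                 to_shift = first_key * second_key
--                 enc_text = enc_text + chr(((ord(ch) - ord('a') + to_shift) % 26) + ord('a'))
--
--             # ch is/between lower case n and m
--             elif ord(ch) >= ord('n') and ord(ch) <= ord('z'):
--
--                 to_shift = first_key + second_key
--                 enc_text = enc_text + chr(((ord(ch) - ord('a') - to_shift) % 26) + ord('a'))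
--
--         # space, commas, point as it is in original text
--         else:
--             enc_text = enc_text + ch
--
--     return enc_text
-- ===== SOURCE B (Python) =====
-- # Table-driven rewrite: precompute the 52-letter substitution once, then a single
-- # table-lookup pass over the message (same formulas, integer-only arithmetic).
-- def text_encryption(msg, first_key, second_key):
--     table = {}
--     for c in "ABCDEFGHIJKLM":
--         table[c] = chr(((ord(c) - ord('A') - first_key) % 26) + ord('A'))
--     for c in "NOPQRSTUVWXYZ":
--         table[c] = chr(((ord(c) - ord('A') + second_key ** 2) % 26) + ord('A'))
--     for c in "abcdefghijklm":
--         table[c] = chr(((ord(c) - ord('a') + first_key * second_key) % 26) + ord('a'))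
--     for c in "nopqrstuvwxyz":
--         table[c] = chr(((ord(c) - ord('a') - (first_key + second_key)) % 26) + ord('a'))
--     out = []
--     for ch in msg:
--         if ch in table:
--             out.append(table[ch])
--         elif not (ch.isupper() or ch.islower()):
--             out.append(ch)
--         # cased characters outside the table are dropped, as in the original
--     return ''.join(out)
-- ===== Notes on version B (the rewrite author's own statement) =====
-- stated objective: faster
-- what changed: B precomputes a 52-entry substitution dict once (same shift formulas) and then makes a single table-lookup pass appending to a list joined at the end, instead of A's per-character branch ladder recomputing the shift and rebuilding the string by repeated concatenation.
import Mathlib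
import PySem

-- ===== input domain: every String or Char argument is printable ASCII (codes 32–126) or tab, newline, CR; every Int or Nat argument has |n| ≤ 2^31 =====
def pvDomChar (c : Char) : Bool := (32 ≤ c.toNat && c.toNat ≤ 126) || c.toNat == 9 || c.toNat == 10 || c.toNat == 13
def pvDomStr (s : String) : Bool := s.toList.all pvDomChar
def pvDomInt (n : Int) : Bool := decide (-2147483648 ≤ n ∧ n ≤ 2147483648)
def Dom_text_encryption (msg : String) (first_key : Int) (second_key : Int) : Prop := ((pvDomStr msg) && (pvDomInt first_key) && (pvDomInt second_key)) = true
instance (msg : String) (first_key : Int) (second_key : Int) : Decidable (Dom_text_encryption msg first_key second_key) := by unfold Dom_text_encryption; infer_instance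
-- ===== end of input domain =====

-- B replaces A's per-character branch ladder by a precomputed 52-letter substitution
-- table (same shift formulas) and a single lookup pass; equivalence on ASCII inputs.

-- ===== PORT A =====
-- ord ch for a Char, as a Python int
def pvOrd (c : Char) : Int := (c.toNat : Int)
-- chr n (n is always in 65..90 / 97..122 here)
def pvChr (n : Int) : Char := Char.ofNat n.toNat

-- one iteration of A's loop; state = (enc_text as chars, to_shift)
def encA_step (first_key second_key : Int) (st : List Char × Int) (ch : Char) : List Char × Int :=
  if PySem.Str.isupper ch then
    if pvOrd ch ≥ pvOrd 'A' ∧ pvOrd ch ≤ pvOrd 'M' then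
      (st.1 ++ [pvChr (PySem.Int.mod (pvOrd ch - pvOrd 'A' - first_key) 26 + pvOrd 'A')], first_key)
    else if pvOrd ch ≥ pvOrd 'N' ∧ pvOrd ch ≤ pvOrd 'Z' then
      (st.1 ++ [pvChr (PySem.Int.mod (pvOrd ch - pvOrd 'A' + second_key ^ 2) 26 + pvOrd 'A')], second_key ^ 2)
    else st
  else if PySem.Str.islower ch then
    if pvOrd ch ≥ pvOrd 'a' ∧ pvOrd ch ≤ pvOrd 'm' then
      (st.1 ++ [pvChr (PySem.Int.mod (pvOrd ch - pvOrd 'a' + first_key * second_key) 26 + pvOrd 'a')], first_key * second_key)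
    else if pvOrd ch ≥ pvOrd 'n' ∧ pvOrd ch ≤ pvOrd 'z' then
      (st.1 ++ [pvChr (PySem.Int.mod (pvOrd ch - pvOrd 'a' - (first_key + second_key)) 26 + pvOrd 'a')], first_key + second_key)
    else st
  else (st.1 ++ [ch], st.2)

def text_encryption (msg : String) (first_key : Int) (second_key : Int) : String :=
  String.mk (msg.toList.foldl (encA_step first_key second_key) ([], 0)).1

-- ===== PORT B =====
-- the four letter groups of Source B
def pvUp1 : List Char := ['A', 'B', 'C', 'D', 'E', 'F', 'G', 'H', 'I', 'J', 'K', 'L', 'M']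
def pvUp2 : List Char := ['N', 'O', 'P', 'Q', 'R', 'S', 'T', 'U', 'V', 'W', 'X', 'Y', 'Z']
def pvLo1 : List Char := ['a', 'b', 'c', 'd', 'e', 'f', 'g', 'h', 'i', 'j', 'k', 'l', 'm']
def pvLo2 : List Char := ['n', 'o', 'p', 'q', 'r', 's', 't', 'u', 'v', 'w', 'x', 'y', 'z']

-- the table built by Source B's four loops of dict assignments
def encB_table (first_key second_key : Int) : PySem.Dict Char Char :=
  let t := pvUp1.foldl (fun d c => d.insert c (pvChr (PySem.Int.mod (pvOrd c - pvOrd 'A' - first_key) 26 + pvOrd 'A'))) PySem.Dict.empty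
  let t := pvUp2.foldl (fun d c => d.insert c (pvChr (PySem.Int.mod (pvOrd c - pvOrd 'A' + second_key ^ 2) 26 + pvOrd 'A'))) t
  let t := pvLo1.foldl (fun d c => d.insert c (pvChr (PySem.Int.mod (pvOrd c - pvOrd 'a' + first_key * second_key) 26 + pvOrd 'a'))) t
  pvLo2.foldl (fun d c => d.insert c (pvChr (PySem.Int.mod (pvOrd c - pvOrd 'a' - (first_key + second_key)) 26 + pvOrd 'a'))) t

-- one iteration of Source B's output loop
def encB_step (table : PySem.Dict Char Char) (acc : List Char) (ch : Char) : List Char :=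
  if table.contains ch then acc ++ [(table.get? ch).getD ch]
  else if !(PySem.Str.isupper ch || PySem.Str.islower ch) then acc ++ [ch]
  else acc

def text_encryption_alt (msg : String) (first_key : Int) (second_key : Int) : String :=
  String.mk (msg.toList.foldl (encB_step (encB_table first_key second_key)) [])

-- ===== PRECONDITION & SPEC =====
def Spec_text_encryption (msg : String) (first_key : Int) (second_key : Int) (out : String) : Prop := out = text_encryption_alt msg first_key second_key
instance (msg : String) (first_key : Int) (second_key : Int) (out : String) : Decidable (Spec_text_encryption msg first_key second_key out) := by unfold Spec_text_encryption; infer_instance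

-- ===== CLAIM (what is proved, stated in full; the proofs are below) =====
def Claim_equal_text_encryption : Prop := ∀ (msg : String) (first_key : Int) (second_key : Int), Dom_text_encryption msg first_key second_key → Spec_text_encryption msg first_key second_key (text_encryption msg first_key second_key)

-- ===== LEMMAS AND PROOFS =====

-- what A emits for one character (the branch ladder, without the dead to_shift state)
def emitA (first_key second_key : Int) (ch : Char) : List Char :=
  if PySem.Str.isupper ch then
    if pvOrd ch ≥ pvOrd 'A' ∧ pvOrd ch ≤ pvOrd 'M' then
      [pvChr (PySem.Int.mod (pvOrd ch - pvOrd 'A' - first_key) 26 + pvOrd 'A')]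
    else if pvOrd ch ≥ pvOrd 'N' ∧ pvOrd ch ≤ pvOrd 'Z' then
      [pvChr (PySem.Int.mod (pvOrd ch - pvOrd 'A' + second_key ^ 2) 26 + pvOrd 'A')]
    else []
  else if PySem.Str.islower ch then
    if pvOrd ch ≥ pvOrd 'a' ∧ pvOrd ch ≤ pvOrd 'm' then
      [pvChr (PySem.Int.mod (pvOrd ch - pvOrd 'a' + first_key * second_key) 26 + pvOrd 'a')]
    else if pvOrd ch ≥ pvOrd 'n' ∧ pvOrd ch ≤ pvOrd 'z' then
      [pvChr (PySem.Int.mod (pvOrd ch - pvOrd 'a' - (first_key + second_key)) 26 + pvOrd 'a')]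
    else []
  else [ch]

-- what B emits for one character (table lookup)
def emitB (first_key second_key : Int) (ch : Char) : List Char :=
  if (encB_table first_key second_key).contains ch then
    [((encB_table first_key second_key).get? ch).getD ch]
  else if !(PySem.Str.isupper ch || PySem.Str.islower ch) then [ch]
  else []

lemma encA_step_fst (first_key second_key : Int) (st : List Char × Int) (ch : Char) :
    (encA_step first_key second_key st ch).1 = st.1 ++ emitA first_key second_key ch := by
  unfold encA_step emitA
  split_ifs <;> simp

lemma foldA_emit (first_key second_key : Int) (l : List Char) :
    ∀ (acc : List Char) (t : Int),
      (l.foldl (encA_step first_key second_key) (acc, t)).1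
        = acc ++ l.flatMap (emitA first_key second_key) := by
  induction l with
  | nil => intro acc t; simp
  | cons c l ih =>
    intro acc t
    rw [List.foldl_cons, ← Prod.mk.eta (p := encA_step first_key second_key (acc, t) c),
      ih, encA_step_fst]
    simp [List.flatMap_cons]

lemma foldB_emit (first_key second_key : Int) (l : List Char) :
    ∀ (acc : List Char),
      l.foldl (encB_step (encB_table first_key second_key)) acc
        = acc ++ l.flatMap (emitB first_key second_key) := by
  induction l with
  | nil => intro acc; simp
  | cons c l ih =>
    intro acc
    have h : encB_step (encB_table first_key second_key) acc c
        = acc ++ emitB first_key second_key c := by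
      unfold encB_step emitB
      split_ifs <;> simp
    rw [List.foldl_cons, h, ih]
    simp [List.flatMap_cons]

-- lookup after a loop of fresh-key inserts with value function f
lemma get?_foldl_insert_fn (f : Char → Char) (L : List Char) (d : PySem.Dict Char Char) (ch : Char) :
    (L.foldl (fun d c => d.insert c (f c)) d).get? ch
      = if ch ∈ L then some (f ch) else d.get? ch := by
  induction L generalizing d with
  | nil => simp
  | cons c L ih =>
    simp only [List.foldl_cons]
    rw [ih]
    by_cases h : ch ∈ L
    · simp [h]
    · by_cases hc : ch = c
      · subst hc; simp [h, PySem.Dict.get?_insert_self]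
      · simp [h, hc, PySem.Dict.get?_insert_of_ne _ _ hc]

-- what the whole table answers for any character
lemma table_get? (first_key second_key : Int) (ch : Char) :
    (encB_table first_key second_key).get? ch
      = if ch ∈ pvLo2 then some (pvChr (PySem.Int.mod (pvOrd ch - pvOrd 'a' - (first_key + second_key)) 26 + pvOrd 'a'))
        else if ch ∈ pvLo1 then some (pvChr (PySem.Int.mod (pvOrd ch - pvOrd 'a' + first_key * second_key) 26 + pvOrd 'a'))
        else if ch ∈ pvUp2 then some (pvChr (PySem.Int.mod (pvOrd ch - pvOrd 'A' + second_key ^ 2) 26 + pvOrd 'A'))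
        else if ch ∈ pvUp1 then some (pvChr (PySem.Int.mod (pvOrd ch - pvOrd 'A' - first_key) 26 + pvOrd 'A'))
        else none := by
  unfold encB_table
  rw [get?_foldl_insert_fn, get?_foldl_insert_fn, get?_foldl_insert_fn,
    get?_foldl_insert_fn, PySem.Dict.get?_empty]

-- the per-character agreement, by enumerating the (finitely many) domain characters
set_option maxRecDepth 131072 in
set_option maxHeartbeats 2000000 in
lemma emit_eq (first_key second_key : Int) (ch : Char) (h : ch.toNat ≤ 126) :
    emitB first_key second_key ch = emitA first_key second_key ch := by
  have he : Char.ofNat ch.toNat = ch := Char.ofNat_toNat ch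
  rw [← he]
  set n := ch.toNat with hn
  clear_value n
  clear he hn
  simp only [emitB, PySem.Dict.contains_eq_isSome_get?, table_get?]
  interval_cases n <;> rfl

lemma flatMap_emit_eq (first_key second_key : Int) (l : List Char)
    (h : ∀ c ∈ l, c.toNat ≤ 126) :
    l.flatMap (emitB first_key second_key) = l.flatMap (emitA first_key second_key) := by
  induction l with
  | nil => simp
  | cons c l ih =>
    simp only [List.flatMap_cons]
    rw [emit_eq first_key second_key c (h c (by simp)),
      ih (fun c hc => h c (List.mem_cons_of_mem _ hc))]

theorem text_encryption_spec : Claim_equal_text_encryption := by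
  intro msg first_key second_key hdom
  unfold Spec_text_encryption text_encryption text_encryption_alt
  rw [foldA_emit, foldB_emit]
  have hall : ∀ c ∈ msg.toList, c.toNat ≤ 126 := by
    have h1 : pvDomStr msg = true := by
      unfold Dom_text_encryption at hdom
      simp only [Bool.and_eq_true] at hdom
      exact hdom.1.1
    intro c hc
    have h2 := (List.all_eq_true.mp h1) c hc
    simp only [pvDomChar, Bool.or_eq_true, Bool.and_eq_true, decide_eq_true_eq,
      beq_iff_eq] at h2
    omega
  rw [flatMap_emit_eq first_key second_key msg.toList hall]
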